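-- pv_equiv track=rewrite | github.com/GiacomoFrn/HL_w_Zeno | hl_w_zeno_TN.py | generate_psi0_list
-- ===== SOURCE A (Python) =====
-- def generate_psi0_list(N, reshaping_step):
--     """
--     Generate the list of initial states for the given reshaping step.
--     """
--     psi_0_list = []
--     flag = True if reshaping_step == 0 or reshaping_step == 2 else False
--     i = 0
--     while i < N:
--         if flag:
--             if reshaping_step == 2 and i == 0:
--                 psi_0_list.append('L')
--                 i+=1
--                 continue
--             psi_0_list.append('0')
--             i+=1
--             flag = False
--         elif N-i == 1:
--             psi_0_list.append('L')
--             i+=1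
--         else:
--             psi_0_list.append('F')
--             flag = True
--             i+=2
--     return psi_0_list
-- ===== SOURCE B (Python) =====
-- def generate_psi0_list(N, reshaping_step):
--     """
--     Generate the list of initial states for the given reshaping step.
--     """
--     flag = reshaping_step == 0 or reshaping_step == 2
--     prefix = []
--     M = N
--     if reshaping_step == 2 and N > 0:
--         prefix = ['L']
--         M = N - 1
--     if M <= 0:
--         return prefix
--     k, r = divmod(M, 3)
--     if flag:
--         body = ['0', 'F'] * k + ([], ['0'], ['0', 'L'])[r]
--     else:
--         body = ['F', '0'] * k + ([], ['L'], ['F'])[r]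
--     return prefix + body
-- ===== Notes on version B (the rewrite author's own statement) =====
-- stated objective: simpler
-- what changed: Replaces A's stateful while-loop (index, toggling flag, per-step appends) by a closed form: an optional 'L' prefix for reshaping_step==2, then divmod(M,3) with list multiplication to build the period-3 body directly.
import Mathlib
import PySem

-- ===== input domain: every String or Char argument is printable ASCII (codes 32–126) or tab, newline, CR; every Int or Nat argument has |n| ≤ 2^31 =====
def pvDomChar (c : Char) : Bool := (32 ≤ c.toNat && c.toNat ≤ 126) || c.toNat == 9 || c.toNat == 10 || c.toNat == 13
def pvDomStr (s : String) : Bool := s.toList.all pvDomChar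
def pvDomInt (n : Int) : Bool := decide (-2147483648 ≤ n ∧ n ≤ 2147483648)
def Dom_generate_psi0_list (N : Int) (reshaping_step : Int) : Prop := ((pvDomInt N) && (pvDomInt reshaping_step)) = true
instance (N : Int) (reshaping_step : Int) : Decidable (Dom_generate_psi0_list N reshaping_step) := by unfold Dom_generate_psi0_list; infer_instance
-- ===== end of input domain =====

-- B replaces A's stateful while-loop by a closed form: period-3 pattern via divmod (objective: simpler).

-- ===== PORT A =====
-- the while loop of A, step for step (i, flag, accumulated list)
def pvLoopA (N reshaping_step i : Int) (flag : Bool) (acc : List String) : List String :=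
  if _h : i < N then
    if flag then
      if reshaping_step == 2 && i == 0 then
        pvLoopA N reshaping_step (i + 1) flag (acc ++ ["L"])
      else
        pvLoopA N reshaping_step (i + 1) false (acc ++ ["0"])
    else if N - i == 1 then
      pvLoopA N reshaping_step (i + 1) flag (acc ++ ["L"])
    else
      pvLoopA N reshaping_step (i + 2) true (acc ++ ["F"])
  else acc
termination_by (N - i).toNat
decreasing_by all_goals omega

def generate_psi0_list (N : Int) (reshaping_step : Int) : List String :=
  let flag := if reshaping_step = 0 ∨ reshaping_step = 2 then true else false
  pvLoopA N reshaping_step 0 flag []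

-- ===== PORT B =====
def generate_psi0_list_alt (N : Int) (reshaping_step : Int) : List String :=
  let flag := reshaping_step == 0 || reshaping_step == 2
  let pm : List String × Int :=
    if reshaping_step == 2 && decide (N > 0) then (["L"], N - 1) else ([], N)
  if pm.2 ≤ 0 then pm.1
  else
    let k := PySem.Int.floordiv pm.2 3
    let r := PySem.Int.mod pm.2 3
    let body :=
      if flag then
        (List.replicate k.toNat ["0", "F"]).flatten ++ [([] : List String), ["0"], ["0", "L"]].getD r.toNat []
      else
        (List.replicate k.toNat ["F", "0"]).flatten ++ [([] : List String), ["L"], ["F"]].getD r.toNat []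
    pm.1 ++ body

-- ===== PRECONDITION & SPEC =====
def Spec_generate_psi0_list (N : Int) (reshaping_step : Int) (out : List String) : Prop := out = generate_psi0_list_alt N reshaping_step
instance (N : Int) (reshaping_step : Int) (out : List String) : Decidable (Spec_generate_psi0_list N reshaping_step out) := by unfold Spec_generate_psi0_list; infer_instance

-- ===== CLAIM (what is proved, stated in full; the proofs are below) =====
def Claim_equal_generate_psi0_list : Prop := ∀ (N : Int) (reshaping_step : Int), Dom_generate_psi0_list N reshaping_step → Spec_generate_psi0_list N reshaping_step (generate_psi0_list N reshaping_step)

-- ===== LEMMAS AND PROOFS =====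

-- abstract characterisation of what A's loop appends when the step-2 guard cannot fire
def bodyT : Nat → Bool → List String
  | 0, _ => []
  | n + 1, true => "0" :: bodyT n false
  | 1, false => ["L"]
  | n + 2, false => "F" :: bodyT n true

lemma pvLoopA_eq (n : Nat) : ∀ (N reshaping_step i : Int) (flag : Bool) (acc : List String),
    (N - i).toNat = n → 0 ≤ i → ¬(reshaping_step = 2 ∧ i = 0) →
    pvLoopA N reshaping_step i flag acc = acc ++ bodyT n flag := by
  induction n using Nat.strong_induction_on with
  | _ n ih =>
    intro N s i flag acc hn hi hg
    rw [pvLoopA]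
    by_cases hlt : i < N
    · simp only [hlt, dif_pos]
      have hguard : (s == 2 && i == 0) = false := by
        simp only [Bool.and_eq_false_iff, beq_eq_false_iff_ne]
        by_cases hs : s = 2
        · right; exact fun h0 => hg ⟨hs, h0⟩
        · left; exact hs
      cases flag with
      | true =>
        simp only [hguard, if_true, Bool.false_eq_true, if_false]
        obtain ⟨m, rfl⟩ : ∃ m, n = m + 1 := ⟨n - 1, by omega⟩
        rw [ih m (by omega) N s (i + 1) false (acc ++ ["0"]) (by omega) (by omega)
          (fun h => by omega)]
        simp [bodyT]
      | false =>
        simp only [Bool.false_eq_true, if_false]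
        by_cases h1 : N - i = 1
        · have : (N - i == 1) = true := by simp [h1]
          simp only [this, if_true]
          rw [ih 0 (by omega) N s (i + 1) false (acc ++ ["L"]) (by omega) (by omega)
            (fun h => by omega)]
          have : n = 1 := by omega
          subst this
          simp [bodyT]
        · have : (N - i == 1) = false := by simp [h1]
          simp only [this, Bool.false_eq_true, if_false]
          obtain ⟨m, rfl⟩ : ∃ m, n = m + 2 := ⟨n - 2, by omega⟩
          rw [ih m (by omega) N s (i + 2) true (acc ++ ["F"]) (by omega) (by omega)
            (fun h => by omega)]
          simp [bodyT]
    · simp only [hlt, dif_neg, not_false_iff]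
      have : n = 0 := by omega
      subst this
      simp [bodyT]

-- closed form of bodyT via division by 3
lemma bodyT_cf (n : Nat) :
    bodyT n true = (List.replicate (n / 3) ["0", "F"]).flatten ++ [([] : List String), ["0"], ["0", "L"]].getD (n % 3) [] ∧
    bodyT n false = (List.replicate (n / 3) ["F", "0"]).flatten ++ [([] : List String), ["L"], ["F"]].getD (n % 3) [] := by
  induction n using Nat.strong_induction_on with
  | _ n ih =>
    rcases n with _ | (_ | (_ | n))
    · exact ⟨by decide, by decide⟩
    · exact ⟨by decide, by decide⟩
    · exact ⟨by decide, by decide⟩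
    · obtain ⟨iht, ihf⟩ := ih n (by omega)
      have hdiv : (n + 3) / 3 = n / 3 + 1 := by omega
      have hmod : (n + 3) % 3 = n % 3 := by omega
      constructor
      · show "0" :: bodyT (n + 2) false = _
        show "0" :: ("F" :: bodyT n true) = _
        rw [iht, hdiv, hmod]
        simp [List.replicate_succ]
      · show "F" :: bodyT (n + 1) true = _
        show "F" :: ("0" :: bodyT n false) = _
        rw [ihf, hdiv, hmod]
        simp [List.replicate_succ]

-- B's body at a positive Int M equals bodyT
lemma alt_body_eq (M : Int) (hM : 0 < M) (flag : Bool) :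
    (if flag then
        (List.replicate (PySem.Int.floordiv M 3).toNat ["0", "F"]).flatten ++ [([] : List String), ["0"], ["0", "L"]].getD (PySem.Int.mod M 3).toNat []
      else
        (List.replicate (PySem.Int.floordiv M 3).toNat ["F", "0"]).flatten ++ [([] : List String), ["L"], ["F"]].getD (PySem.Int.mod M 3).toNat [])
    = bodyT M.toNat flag := by
  obtain ⟨m, rfl⟩ : ∃ m : Nat, M = (m : Int) := ⟨M.toNat, by omega⟩
  have hk : PySem.Int.floordiv (m : Int) 3 = ((m / 3 : Nat) : Int) := by
    exact_mod_cast PySem.Int.floordiv_natCast m 3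
  have hr : PySem.Int.mod (m : Int) 3 = ((m % 3 : Nat) : Int) := by
    exact_mod_cast PySem.Int.mod_natCast m 3
  rw [hk, hr]
  simp only [Int.toNat_natCast]
  obtain ⟨ht, hf⟩ := bodyT_cf m
  cases flag <;> simp [ht, hf]

-- ===== VERDICT (by name: the statement is the Claim_ definition above) =====
theorem generate_psi0_list_spec : Claim_equal_generate_psi0_list := by
  intro N s _dom
  unfold Spec_generate_psi0_list generate_psi0_list generate_psi0_list_alt
  by_cases hN : 0 < N
  · by_cases hs2 : s = 2
    · subst hs2
      have hA : pvLoopA N 2 0 true [] = pvLoopA N 2 1 true ["L"] := by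
        rw [pvLoopA]; simp [hN]
      have hcond : ((2 : Int) == 2 && decide (N > 0)) = true := by simp [hN]
      simp only [or_true, if_true, hcond]
      rw [hA, pvLoopA_eq (N - 1).toNat N 2 1 true ["L"] (by omega) (by omega) (by omega)]
      by_cases h1 : N - 1 ≤ 0
      · have h0 : (N - 1).toNat = 0 := by omega
        rw [h0]
        simp [h1, bodyT]
      · have hpos : 0 < N - 1 := by omega
        have hbody := alt_body_eq (N - 1) hpos true
        simp only [if_true] at hbody
        simp only [h1, if_false]
        simp only [List.cons_append, List.nil_append]
        simp
        simp at hbody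
        exact hbody.symm
    · have hA := pvLoopA_eq N.toNat N s 0 (if s = 0 ∨ s = 2 then true else false) []
        (by omega) (by omega) (by omega)
      rw [hA]
      have hcond : (s == 2 && decide (N > 0)) = false := by simp [hs2]
      have hMle : ¬ N ≤ 0 := by omega
      by_cases hs0 : s = 0
      · subst hs0
        have hbody := alt_body_eq N hN true
        simp only [if_true] at hbody
        simp [hMle]
        simp at hbody
        exact hbody.symm
      · have hbody := alt_body_eq N hN false
        simp only [Bool.false_eq_true, if_false] at hbody
        simp [hcond, hMle, hs0, hs2]
        simp at hbody
        exact hbody.symm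
  · have hA : pvLoopA N s 0 (if s = 0 ∨ s = 2 then true else false) [] = [] := by
      rw [pvLoopA]; simp [hN]
    have hcond : (s == 2 && decide (N > 0)) = false := by simp [hN]
    have hle : N ≤ 0 := by omega
    rw [hA]
    simp [hcond, hle]
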